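-- pv_equiv track=rewrite | github.com/ihgazni2/dlixhict-didactic | xdict/elist.py | last_continuous_indexesnot_slice
-- ===== SOURCE A (Python) =====
-- def last_continuous_indexesnot_slice(ol,value):
--     '''
--         from xdict.elist import *
--         ol = [1,"a","a",2,3,"a",4,"a","a","a",5]
--         last_continuous_indexesnot_slice(ol,"a")
--     '''
--     length = ol.__len__()
--     end = None
--     slice = []
--     for i in range(length-1,-1,-1):
--         if(not(ol[i]==value)):
--             end = i
--             break
--         else:
--             pass
--     if(end == None):
--         return(None)
--     else:
--         slice.append(end)
--         for i in range(end-1,-1,-1):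
--             if(not(ol[i]==value)):
--                 slice.append(i)
--             else:
--                 break
--     slice.reverse()
--     return(slice)
-- ===== SOURCE B (Python) =====
-- def last_continuous_indexesnot_slice(ol, value):
--     last = None
--     cur = []
--     for i, x in enumerate(ol):
--         if not (x == value):
--             cur.append(i)
--         else:
--             if cur:
--                 last = cur
--             cur = []
--     if cur:
--         return cur
--     return last
-- ===== Notes on version B (the rewrite author's own statement) =====
-- stated objective: alternative
-- what changed: A locates the last non-value index by a backward scan and then extends backward to collect the run; B is a single forward pass that groups indices into contiguous non-value runs, resetting on value elements and keeping the last completed run.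
import Mathlib
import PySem

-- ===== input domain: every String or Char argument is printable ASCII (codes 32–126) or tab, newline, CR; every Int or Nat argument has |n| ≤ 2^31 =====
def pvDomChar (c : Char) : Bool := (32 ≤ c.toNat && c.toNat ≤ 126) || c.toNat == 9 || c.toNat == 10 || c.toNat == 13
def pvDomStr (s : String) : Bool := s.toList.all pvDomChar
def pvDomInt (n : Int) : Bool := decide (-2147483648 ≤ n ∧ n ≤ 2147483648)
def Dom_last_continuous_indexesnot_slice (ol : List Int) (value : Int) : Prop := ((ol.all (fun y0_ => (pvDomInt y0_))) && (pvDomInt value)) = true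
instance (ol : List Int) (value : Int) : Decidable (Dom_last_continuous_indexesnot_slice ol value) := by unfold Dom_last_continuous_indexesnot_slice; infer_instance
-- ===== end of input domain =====

-- B replaces A's backward locate-then-extend scan by one forward pass grouping contiguous non-value runs (alternative decomposition, same cost).

-- ===== PORT A =====
-- ol[i] on an index drawn from range(length-1,-1,-1) / range(end-1,-1,-1) is always in range, so the
-- pyGetD default 0 is never used (exact).
-- first loop: break at the first i (descending) with not(ol[i]==value)
def pvAfirst (ol : List Int) (value : Int) : List Int → Option Int
  | [] => none
  | i :: rest => if !(PySem.List.pyGetD ol i 0 == value) then some i else pvAfirst ol value rest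

-- second loop: append indices while not(ol[i]==value), break otherwise
def pvAcollect (ol : List Int) (value : Int) (slice : List Int) : List Int → List Int
  | [] => slice
  | i :: rest => if !(PySem.List.pyGetD ol i 0 == value) then pvAcollect ol value (slice ++ [i]) rest else slice

-- length = ol.__len__() is inlined as (ol.length : Int)
def last_continuous_indexesnot_slice (ol : List Int) (value : Int) : Option (List Int) :=
  match pvAfirst ol value (PySem.List.pyRange ((ol.length : Int) - 1) (-1) (-1)) with
  | none => none
  | some e => some ((pvAcollect ol value [e] (PySem.List.pyRange (e - 1) (-1) (-1))).reverse)

-- ===== PORT B =====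
-- one forward pass over enumerate(ol): state = (last completed run, current run)
def pvBstep (value : Int) (st : Option (List Int) × List Int) (p : Int × Int) : Option (List Int) × List Int :=
  if !(p.2 == value) then (st.1, st.2 ++ [p.1])
  else (if st.2 = [] then st.1 else some st.2, [])

def last_continuous_indexesnot_slice_alt (ol : List Int) (value : Int) : Option (List Int) :=
  let st := (PySem.List.enumerate ol 0).foldl (pvBstep value) (none, [])
  if st.2 = [] then st.1 else some st.2

-- ===== PRECONDITION & SPEC =====
def Spec_last_continuous_indexesnot_slice (ol : List Int) (value : Int) (out : Option (List Int)) : Prop := out = last_continuous_indexesnot_slice_alt ol value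
instance (ol : List Int) (value : Int) (out : Option (List Int)) : Decidable (Spec_last_continuous_indexesnot_slice ol value out) := by unfold Spec_last_continuous_indexesnot_slice; infer_instance

-- ===== CLAIM (what is proved, stated in full; the proofs are below) =====
def Claim_equal_last_continuous_indexesnot_slice : Prop := ∀ (ol : List Int) (value : Int), Dom_last_continuous_indexesnot_slice ol value → Spec_last_continuous_indexesnot_slice ol value (last_continuous_indexesnot_slice ol value)

-- ===== LEMMAS AND PROOFS =====

-- common middle form: on the reversed enumeration, drop the trailing value-block, take the run
def pvGold (value : Int) (L : List (Int × Int)) : Option (List Int) :=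
  match L.reverse.dropWhile (fun p => p.2 == value) with
  | [] => none
  | e :: rest => some ((e.1 :: (rest.takeWhile (fun p => !(p.2 == value))).map Prod.fst).reverse)

-- A's first loop is head? of dropWhile
lemma pvAfirst_eq (ol : List Int) (value : Int) (l : List Int) :
    pvAfirst ol value l = (l.dropWhile (fun i => PySem.List.pyGetD ol i 0 == value)).head? := by
  induction l with
  | nil => rfl
  | cons i rest ih =>
      by_cases h : PySem.List.pyGetD ol i 0 == value
      · simp [pvAfirst, h, ih]
      · simp [pvAfirst, h]

-- A's second loop is append of takeWhile
lemma pvAcollect_eq (ol : List Int) (value : Int) (slice l : List Int) :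
    pvAcollect ol value slice l = slice ++ l.takeWhile (fun i => !(PySem.List.pyGetD ol i 0 == value)) := by
  induction l generalizing slice with
  | nil => simp [pvAcollect]
  | cons i rest ih =>
      by_cases h : PySem.List.pyGetD ol i 0 == value
      · simp [pvAcollect, h]
      · simp [pvAcollect, h, ih]

-- dropWhile on a countdown range is empty or e :: countdown from e-1
lemma pvDrop_pyRange (d : Int → Bool) (a : Int) :
    (PySem.List.pyRange a (-1) (-1)).dropWhile d = [] ∨
    ∃ e, (PySem.List.pyRange a (-1) (-1)).dropWhile d = e :: PySem.List.pyRange (e - 1) (-1) (-1) := by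
  by_cases ha : a ≤ -1
  · left; rw [PySem.List.pyRange_neg_one_eq_nil ha]; rfl
  · have h1 : (-1 : Int) < a := by omega
    have hlt : ((a - 1 + 1).toNat) < ((a + 1).toNat) := by omega
    rw [PySem.List.pyRange_neg_one_cons h1, List.dropWhile_cons]
    by_cases hd : d a
    · simpa [hd] using pvDrop_pyRange d (a - 1)
    · right; exact ⟨a, by simp [hd]⟩
termination_by (a + 1).toNat
decreasing_by omega

-- the reversed enumeration is the countdown range paired with lookups
lemma pvEnum_rev (ol : List Int) :
    (PySem.List.enumerate ol 0).reverse =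
    (PySem.List.pyRange ((ol.length : Int) - 1) (-1) (-1)).map (fun i => (i, PySem.List.pyGetD ol i 0)) := by
  induction ol using List.reverseRecOn with
  | nil => rfl
  | append_singleton ol x ih =>
      have h1 : (-1 : Int) < (ol.length : Int) := by omega
      rw [PySem.List.enumerate_append]
      have hr : ((ol ++ [x]).length : Int) - 1 = (ol.length : Int) := by
        simp
      rw [hr, PySem.List.pyRange_neg_one_cons h1]
      simp only [List.reverse_append, List.map_cons]
      have hx : PySem.List.pyGetD (ol ++ [x]) ((ol.length : Int)) 0 = x := by
        simp [PySem.List.pyGetD_natCast, List.getD]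
      have htail : (PySem.List.pyRange ((ol.length : Int) - 1) (-1) (-1)).map
            (fun i => (i, PySem.List.pyGetD (ol ++ [x]) i 0)) =
          (PySem.List.pyRange ((ol.length : Int) - 1) (-1) (-1)).map
            (fun i => (i, PySem.List.pyGetD ol i 0)) := by
        apply List.map_congr_left
        intro i hi
        have hmem := (PySem.List.mem_pyRange_neg_one).1 hi
        have h0 : 0 ≤ i := by omega
        have h2 : i < (ol.length : Int) := by omega
        have : PySem.List.pyGetD (ol ++ [x]) i 0 = PySem.List.pyGetD ol i 0 := by
          rw [PySem.List.pyGetD_eq_getElem (ol ++ [x]) 0 h0 (by simp; omega),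
              PySem.List.pyGetD_eq_getElem ol 0 h0 (by exact_mod_cast h2)]
          rw [List.getElem_append_left]
        rw [this]
      simp [PySem.List.enumerate_cons, PySem.List.enumerate_nil, hx, htail, ih]

-- A equals the middle form
lemma pvA_eq_gold (ol : List Int) (value : Int) :
    last_continuous_indexesnot_slice ol value = pvGold value (PySem.List.enumerate ol 0) := by
  unfold last_continuous_indexesnot_slice pvGold
  rw [pvEnum_rev, List.dropWhile_map, pvAfirst_eq]
  simp only [Function.comp_def]
  rcases pvDrop_pyRange (fun i => PySem.List.pyGetD ol i 0 == value) ((ol.length : Int) - 1) with h | ⟨e, h⟩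
  · simp [h]
  · simp only [h, List.map_cons, List.head?_cons, List.takeWhile_map, List.map_map]
    rw [pvAcollect_eq]
    simp [Function.comp_def]

-- B's loop invariant: second component is the current trailing run; folding the answer rule gives the middle form
lemma pvB_inv (value : Int) (L : List (Int × Int)) :
    (L.foldl (pvBstep value) (none, [])).2 =
      ((L.reverse.takeWhile (fun p => !(p.2 == value))).map Prod.fst).reverse ∧
    (if (L.foldl (pvBstep value) (none, [])).2 = [] then (L.foldl (pvBstep value) (none, [])).1
     else some (L.foldl (pvBstep value) (none, [])).2) = pvGold value L := by
  induction L using List.reverseRecOn with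
  | nil => constructor <;> rfl
  | append_singleton L p ih =>
      obtain ⟨ih1, ih2⟩ := ih
      rw [List.foldl_append]
      simp only [List.foldl_cons, List.foldl_nil]
      by_cases h : p.2 == value
      · have hstep : pvBstep value (L.foldl (pvBstep value) (none, [])) p =
            ((if (L.foldl (pvBstep value) (none, [])).2 = []
              then (L.foldl (pvBstep value) (none, [])).1
              else some (L.foldl (pvBstep value) (none, [])).2), []) := by
          simp [pvBstep, h]
        rw [hstep]
        constructor
        · simp [h]
        · simp only [pvGold, List.reverse_append, List.reverse_singleton, List.singleton_append,
            List.dropWhile_cons, h]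
          simpa [pvGold] using ih2
      · have hstep : pvBstep value (L.foldl (pvBstep value) (none, [])) p =
            ((L.foldl (pvBstep value) (none, [])).1,
             (L.foldl (pvBstep value) (none, [])).2 ++ [p.1]) := by
          simp [pvBstep, h]
        rw [hstep]
        constructor
        · simp [h, ih1]
        · simp only [pvGold, List.reverse_append, List.reverse_singleton, List.singleton_append,
            List.dropWhile_cons, h]
          simp [ih1]

-- B equals the middle form
lemma pvB_eq_gold (ol : List Int) (value : Int) :
    last_continuous_indexesnot_slice_alt ol value = pvGold value (PySem.List.enumerate ol 0) := by
  unfold last_continuous_indexesnot_slice_alt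
  exact (pvB_inv value (PySem.List.enumerate ol 0)).2

-- ===== VERDICT (by name: the statement is the Claim_ definition above) =====
theorem last_continuous_indexesnot_slice_spec : Claim_equal_last_continuous_indexesnot_slice := by
  intro ol value _
  unfold Spec_last_continuous_indexesnot_slice
  rw [pvA_eq_gold, pvB_eq_gold]
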